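-- pv_equiv track=rewrite | github.com/Saowarod/Edabit | Repdigit.py | repdigit
-- ===== SOURCE A (Python) =====
-- def repdigit(num):
--     for ele in str(num):
--         if ele != str(num)[0]:
--             return False
--             break
--         else:
--             continue
--     return True
-- ===== SOURCE B (Python) =====
-- def repdigit(num):
--     return len(set(str(num))) == 1
-- ===== Notes on version B (the rewrite author's own statement) =====
-- stated objective: simpler
-- what changed: Replaces A's explicit loop comparing every character to the first with building the set of distinct characters of str(num) and testing that its cardinality is 1 (no positional comparison at all).
import Mathlib
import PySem

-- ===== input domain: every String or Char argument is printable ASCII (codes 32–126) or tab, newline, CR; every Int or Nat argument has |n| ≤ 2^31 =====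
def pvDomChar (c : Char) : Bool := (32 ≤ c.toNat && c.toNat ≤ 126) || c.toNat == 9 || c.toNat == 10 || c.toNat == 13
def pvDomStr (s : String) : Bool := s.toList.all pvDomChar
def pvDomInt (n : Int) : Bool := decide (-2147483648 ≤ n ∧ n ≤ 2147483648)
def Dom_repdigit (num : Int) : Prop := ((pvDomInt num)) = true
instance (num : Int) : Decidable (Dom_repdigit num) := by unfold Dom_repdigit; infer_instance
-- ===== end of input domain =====

-- B replaces A's compare-each-digit-to-the-first loop with counting the distinct characters of str(num) (a set) and testing |set| = 1; return values only.

-- ===== PORT A =====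
-- A's loop: for ele in str(num): if ele != str(num)[0]: return False; return True
def repdigitLoop (h : Char) : List Char → Bool
  | [] => true
  | e :: rest => if e ≠ h then false else repdigitLoop h rest

def repdigit (num : Int) : Bool :=
  let s := (PySem.Int.toStr num).toList
  -- str(num)[0]: s is never empty, so pyGet? s 0 = the head; headD stands in for it
  repdigitLoop (s.headD ' ') s

-- ===== PORT B =====
-- len(set(str(num))) == 1
def repdigit_alt (num : Int) : Bool :=
  PySem.Set.len (PySem.Set.ofList (PySem.Int.toStr num).toList) == 1

-- ===== PRECONDITION & SPEC =====
def Spec_repdigit (num : Int) (out : Bool) : Prop := out = repdigit_alt num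
instance (num : Int) (out : Bool) : Decidable (Spec_repdigit num out) := by unfold Spec_repdigit; infer_instance

-- ===== CLAIM (what is proved, stated in full; the proofs are below) =====
def Claim_equal_repdigit : Prop := ∀ (num : Int), Dom_repdigit num → Spec_repdigit num (repdigit num)

-- ===== LEMMAS AND PROOFS =====

-- growing the accumulator never shrinks toDigitsCore's output
theorem toDigitsCore_length_ge (b : Nat) (fuel : Nat) :
    ∀ (n : Nat) (l : List Char), l.length ≤ (Nat.toDigitsCore b fuel n l).length := by
  induction fuel with
  | zero => intro n l; simp [Nat.toDigitsCore]
  | succ f ih =>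
    intro n l
    simp only [Nat.toDigitsCore]
    split
    · simp
    · exact le_trans (by simp) (ih (n / b) _)

theorem toDigits_ne_nil (b n : Nat) : Nat.toDigits b n ≠ [] := by
  unfold Nat.toDigits
  simp only [Nat.toDigitsCore]
  split
  · simp
  · intro hnil
    have hge := toDigitsCore_length_ge b n (n / b) [Nat.digitChar (n % b)]
    rw [hnil] at hge
    simp at hge

theorem toChars_ne_nil (n : Int) : PySem.Int.toChars n ≠ [] := by
  unfold PySem.Int.toChars
  split
  · simp
  · exact toDigits_ne_nil 10 _

-- Set.add to a set already containing h of size ≥ 1 keeps size ≥ 1; foldl never shrinks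
theorem length_foldl_add_ge {α : Type} [BEq α] (t : List α) :
    ∀ (s : PySem.Set α), s.length ≤ (t.foldl PySem.Set.add s).length := by
  induction t with
  | nil => intro s; simp
  | cons e rest ih =>
    intro s
    refine le_trans ?_ (ih (PySem.Set.add s e))
    unfold PySem.Set.add
    split <;> simp

-- A's loop over the tail equals "the set built from [h] over the tail is still just [h]" as a size test
theorem loop_eq_set (h : Char) (t : List Char) :
    repdigitLoop h t = ((t.foldl PySem.Set.add [h]).length == 1) := by
  induction t with
  | nil => simp [repdigitLoop, PySem.Set]
  | cons e rest ih =>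
    by_cases he : e = h
    · subst he
      simpa [repdigitLoop, PySem.Set.add, PySem.Set.contains] using ih
    · have hge := length_foldl_add_ge rest (PySem.Set.add [h] e)
      have hadd : PySem.Set.add ([h] : PySem.Set Char) e = [h, e] := by
        simp [PySem.Set.add, PySem.Set.contains, he]
      rw [hadd] at hge
      simp only [List.length_cons, List.length_nil] at hge
      simp only [repdigitLoop, if_pos he, List.foldl, hadd]
      symm
      simp only [beq_eq_false_iff_ne, ne_eq]
      omega

-- ===== VERDICT (by name: the statement is the Claim_ definition above) =====
theorem repdigit_spec : Claim_equal_repdigit := by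
  intro num _
  unfold Spec_repdigit repdigit repdigit_alt
  have hne : (PySem.Int.toStr num).toList ≠ [] := by
    rw [PySem.Int.toList_toStr]; exact toChars_ne_nil num
  obtain ⟨h, t, hht⟩ := List.exists_cons_of_ne_nil hne
  rw [hht]
  simp only [List.headD]
  have h1 : repdigitLoop h (h :: t) = repdigitLoop h t := by
    simp [repdigitLoop]
  rw [h1, loop_eq_set h t]
  have h2 : PySem.Set.ofList (h :: t) = t.foldl PySem.Set.add [h] := by
    simp [PySem.Set.ofList, List.foldl, PySem.Set.add, PySem.Set.contains, PySem.Set.empty]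
  simp [PySem.Set.len, h2]
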